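-- pv_equiv track=rewrite | github.com/cannlytics/cannlytics | datasets/cannabis_sales/algorithms/get_sales_wa.py | ripple_list
-- ===== SOURCE A (Python) =====
-- def ripple_list(file_paths, n):
--     """
--     Given a list of file paths and a starting point 'n', generates an
--     ordered list of dataset paths spiraling outwards. The order starts
--     at the given index 'n' and then alternates between one less and one
--     greater, continuing to spiral out from the initial index.
--
--     Args:
--         file_paths (list): The list of file paths.
--         n (int): The starting index for the datasets.
--
--     Returns:
--         list: A list of dataset paths in the order they should be
--         searched, starting from 'n' and spiraling outwards.
--
--     Example:
--         file_paths = ['file_path_0', 'file_path_1', ..., 'file_path_96']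
--         ripple_list(file_paths, 25)
--         >> ['file_path_25', 'file_path_24', 'file_path_26', 'file_path_23', 'file_path_27', ... , 'file_path_96']
--     """
--     dataset_paths = []
--     dataset_paths.append(file_paths[n])
--     left, right = n - 1, n + 1
--     total_paths = len(file_paths)
--     while left >= 0 or right < total_paths:
--         if left >= 0:
--             dataset_paths.append(file_paths[left])
--             left -= 1
--         if right < total_paths:
--             dataset_paths.append(file_paths[right])
--             right += 1
--     return dataset_paths
-- ===== SOURCE B (Python) =====
-- def ripple_list(file_paths, n):
--     first = file_paths[n]
--     total = len(file_paths)
--     left = [file_paths[i] for i in range(n - 1, -1, -1)]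
--     right = [file_paths[i] for i in range(n + 1, total)]
--     paired = [p for pair in zip(left, right) for p in pair]
--     k = min(len(left), len(right))
--     return [first] + paired + (left[k:] or right[k:])
-- ===== Notes on version B (the rewrite author's own statement) =====
-- stated objective: alternative
-- what changed: Replaces A's two-cursor while loop (mutating left/right with per-iteration ifs) by building the descending-left and ascending-right index sequences up front, mapping them to paths, and interleaving them with zip and appending the longer side's remaining tail.
import Mathlib
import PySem

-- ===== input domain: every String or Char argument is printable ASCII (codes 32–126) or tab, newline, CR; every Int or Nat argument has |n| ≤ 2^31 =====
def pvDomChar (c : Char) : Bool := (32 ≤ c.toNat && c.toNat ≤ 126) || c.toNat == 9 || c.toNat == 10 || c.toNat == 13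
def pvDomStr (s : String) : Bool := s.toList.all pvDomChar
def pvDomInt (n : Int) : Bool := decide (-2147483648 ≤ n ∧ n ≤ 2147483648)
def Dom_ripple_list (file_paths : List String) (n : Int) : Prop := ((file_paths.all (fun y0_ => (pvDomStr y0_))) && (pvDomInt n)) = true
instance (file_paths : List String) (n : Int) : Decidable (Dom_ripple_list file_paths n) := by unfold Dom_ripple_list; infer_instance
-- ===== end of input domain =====

-- B replaces A's two-cursor while loop by building the left and right index sequences
-- up front and interleaving them (zip + leftover tail); same cost, different decomposition.

-- ===== PORT A =====
-- the while loop: per iteration, take file_paths[left] if left >= 0 and file_paths[right] if right < total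
-- (indices reached here are always in range once file_paths[n] succeeded, so pyGetD's default is unreachable)
-- fuel = the loop's exact iteration-count bound, passed explicitly so the recursion is structural
def rippleLoop (fp : List String) (total : Int) : Nat → Int → Int → List String
  | 0, _, _ => []      -- fuel exhausted; unreachable from ripple_list's call below
  | fuel + 1, left, right =>
    if 0 ≤ left ∨ right < total then
      if 0 ≤ left then
        if right < total then
          PySem.List.pyGetD fp left "" :: PySem.List.pyGetD fp right "" ::
            rippleLoop fp total fuel (left - 1) (right + 1)
        else
          PySem.List.pyGetD fp left "" :: rippleLoop fp total fuel (left - 1) right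
      else
        PySem.List.pyGetD fp right "" :: rippleLoop fp total fuel left (right + 1)
    else []

def ripple_list (file_paths : List String) (n : Int) : List String :=
  match PySem.List.pyGet? file_paths n with
  | none => []          -- Python raises IndexError here; excluded by Pre_
  | some first =>
    first :: rippleLoop file_paths (file_paths.length : Int)
      (n.toNat + ((file_paths.length : Int) - (n + 1)).toNat) (n - 1) (n + 1)

-- ===== PORT B =====
def ripple_list_alt (file_paths : List String) (n : Int) : List String :=
  match PySem.List.pyGet? file_paths n with
  | none => []          -- Python raises IndexError here; excluded by Pre_
  | some first =>
    let total : Int := file_paths.length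
    -- comprehension indices are always in range once file_paths[n] succeeded, so pyGetD's default is unreachable
    let left := (PySem.List.pyRange (n - 1) (-1) (-1)).map (fun i => PySem.List.pyGetD file_paths i "")
    let right := (PySem.List.pyRange (n + 1) total 1).map (fun i => PySem.List.pyGetD file_paths i "")
    let paired := (left.zip right).flatMap (fun p => [p.1, p.2])
    let k := min left.length right.length
    first :: (paired ++ (if left.drop k ≠ [] then left.drop k else right.drop k))

-- ===== PRECONDITION & SPEC =====
-- Pre_ excludes exactly the inputs where Python's file_paths[n] raises IndexError (n outside [-len, len))
def Pre_ripple_list (file_paths : List String) (n : Int) : Prop :=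
  PySem.Raise.InRange file_paths.length n
instance (file_paths : List String) (n : Int) : Decidable (Pre_ripple_list file_paths n) := by unfold Pre_ripple_list; infer_instance
def pvWitness_ripple_list : List String × Int := (["a", "b", "c", "d"], 1)

def Spec_ripple_list (file_paths : List String) (n : Int) (out : List String) : Prop := out = ripple_list_alt file_paths n
instance (file_paths : List String) (n : Int) (out : List String) : Decidable (Spec_ripple_list file_paths n out) := by unfold Spec_ripple_list; infer_instance

-- ===== CLAIM (what is proved, stated in full; the proofs are below) =====
def Claim_equal_ripple_list : Prop := ∀ (file_paths : List String) (n : Int), Dom_ripple_list file_paths n → Pre_ripple_list file_paths n → Spec_ripple_list file_paths n (ripple_list file_paths n)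

-- ===== LEMMAS AND PROOFS =====

-- proof-side view of both programs: interleave two lists, longer tail appended
def pvInterleave : List String → List String → List String
  | [], ys => ys
  | x :: xs, [] => x :: xs
  | x :: xs, y :: ys => x :: y :: pvInterleave xs ys

theorem pvInterleave_nil_right (xs : List String) : pvInterleave xs [] = xs := by
  cases xs <;> rfl

theorem pvInterleave_nil_left (ys : List String) : pvInterleave [] ys = ys := rfl

-- pyRange with step -1 down to -1, induction forms
theorem pyRange_negstep_cons (a : Int) (h : 0 ≤ a) :
    PySem.List.pyRange a (-1) (-1) = a :: PySem.List.pyRange (a - 1) (-1) (-1) := by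
  simp only [PySem.List.pyRange]
  norm_num
  have h1 : (a + 1).toNat = a.toNat + 1 := by omega
  rw [if_pos (show (-1:Int) < a from by omega), h1, List.range_succ_eq_map, List.map_cons,
    List.map_map]
  by_cases h2 : 0 < a
  · rw [if_pos h2]
    congr 1
    · norm_num
    apply List.map_congr_left
    intro k _
    simp
    omega
  · rw [if_neg h2]
    have ha0 : a = 0 := by omega
    subst ha0
    simp

theorem pyRange_negstep_nil (a : Int) (h : a < 0) :
    PySem.List.pyRange a (-1) (-1) = [] := by
  simp only [PySem.List.pyRange]
  norm_num
  omega

-- A's loop equals interleave of the two mapped index sequences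
theorem rippleLoop_eq_interleave (fp : List String) (total : Int) (fuel : Nat)
    (left right : Int) (hf : (left + 1).toNat + (total - right).toNat ≤ fuel) :
    rippleLoop fp total fuel left right =
      pvInterleave
        ((PySem.List.pyRange left (-1) (-1)).map (fun i => PySem.List.pyGetD fp i ""))
        ((PySem.List.pyRange right total 1).map (fun i => PySem.List.pyGetD fp i "")) := by
  induction fuel generalizing left right with
  | zero =>
    rw [rippleLoop, pyRange_negstep_nil left (by omega),
      PySem.List.pyRange_one_eq_nil (by omega)]
    rfl
  | succ fuel ih =>
    rw [rippleLoop]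
    by_cases hguard : 0 ≤ left ∨ right < total
    · rw [if_pos hguard]
      by_cases hl : 0 ≤ left
      · by_cases hr : right < total
        · rw [if_pos hl, if_pos hr, ih _ _ (by omega),
            pyRange_negstep_cons left hl, PySem.List.pyRange_one_cons hr]
          rfl
        · rw [if_pos hl, if_neg hr, ih _ _ (by omega),
            pyRange_negstep_cons left hl, PySem.List.pyRange_one_eq_nil (by omega)]
          simp [pvInterleave_nil_right]
      · have hr : right < total := by tauto
        rw [if_neg hl, ih _ _ (by omega),
          pyRange_negstep_nil left (by omega), PySem.List.pyRange_one_cons hr]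
        rfl
    · rw [if_neg hguard, pyRange_negstep_nil left (by omega),
        PySem.List.pyRange_one_eq_nil (by omega)]
      rfl

-- B's zip/flatMap + leftover tail equals interleave
theorem zip_flatMap_eq_interleave (xs ys : List String) :
    (xs.zip ys).flatMap (fun p => [p.1, p.2]) ++
      (if xs.drop (min xs.length ys.length) ≠ [] then xs.drop (min xs.length ys.length)
       else ys.drop (min xs.length ys.length)) = pvInterleave xs ys := by
  induction xs generalizing ys with
  | nil => simp [pvInterleave_nil_left]
  | cons x xs ih =>
    cases ys with
    | nil => simp [pvInterleave_nil_right]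
    | cons y ys =>
      have hmin : min (xs.length + 1) (ys.length + 1) = min xs.length ys.length + 1 := by omega
      simp only [List.zip_cons_cons, List.flatMap_cons, List.length_cons, hmin,
        List.drop_succ_cons, pvInterleave, List.cons_append, List.nil_append]
      rw [ih ys]

-- ===== VERDICT (by name: the statement is the Claim_ definition above) =====
theorem ripple_list_spec : Claim_equal_ripple_list := by
  intro fp n _ _
  unfold Spec_ripple_list ripple_list ripple_list_alt
  cases h : PySem.List.pyGet? fp n with
  | none => rfl
  | some first =>
    simp only
    rw [rippleLoop_eq_interleave fp _ _ _ _ (by omega), zip_flatMap_eq_interleave]
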